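-- pv_equiv track=rewrite | github.com/Sahil-u07/concore | concore_cli/commands/validate.py | check_graph_connectivity
-- ===== SOURCE A (Python) =====
-- from collections import defaultdict, deque
-- from typing import List, Set, Tuple, Dict
--
-- def check_graph_connectivity(nodes_dict: Dict[str, str], edges: List[Tuple[str, str]]) -> Tuple[bool, List[str]]:
--     """
--     Check if all nodes are reachable in the graph.
--
--     Returns:
--         (is_fully_connected, list_of_unreachable_nodes)
--     """
--     if not nodes_dict:
--         return True, []
--
--     # Build adjacency list (undirected for connectivity check)
--     graph = defaultdict(set)
--     for source, target in edges:
--         graph[source].add(target)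
--         graph[target].add(source)
--
--     # BFS from first node
--     start_node = next(iter(nodes_dict.keys()))
--     visited = set()
--     queue = deque([start_node])
--
--     while queue:
--         node = queue.popleft()
--         if node in visited:
--             continue
--         visited.add(node)
--         for neighbor in graph[node]:
--             if neighbor not in visited:
--                 queue.append(neighbor)
--
--     unreachable = [nodes_dict[nid] for nid in nodes_dict.keys() if nid not in visited]
--
--     return len(unreachable) == 0, unreachable
-- ===== SOURCE B (Python) =====
-- def check_graph_connectivity(nodes_dict, edges):
--     """
--     Check if all nodes are reachable in the graph.
--
--     Returns:
--         (is_fully_connected, list_of_unreachable_nodes)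
--     """
--     if not nodes_dict:
--         return True, []
--
--     # Label propagation: grow the set reachable from the first node by
--     # scanning the edge list until a full pass changes nothing.
--     reach = {next(iter(nodes_dict))}
--     changed = True
--     while changed:
--         changed = False
--         for a, b in edges:
--             if (a in reach) != (b in reach):
--                 reach.add(a)
--                 reach.add(b)
--                 changed = True
--
--     unreachable = [v for k, v in nodes_dict.items() if k not in reach]
--     return not unreachable, unreachable
-- ===== Notes on version B (the rewrite author's own statement) =====
-- stated objective: simpler
-- what changed: Replaced A's defaultdict-adjacency-list + deque BFS flood fill with a queue-free label propagation: repeatedly sweep the raw edge list, pulling both endpoints of any edge that straddles the reachable set, until a full sweep changes nothing; no adjacency structure or queue is built.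
import Mathlib
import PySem

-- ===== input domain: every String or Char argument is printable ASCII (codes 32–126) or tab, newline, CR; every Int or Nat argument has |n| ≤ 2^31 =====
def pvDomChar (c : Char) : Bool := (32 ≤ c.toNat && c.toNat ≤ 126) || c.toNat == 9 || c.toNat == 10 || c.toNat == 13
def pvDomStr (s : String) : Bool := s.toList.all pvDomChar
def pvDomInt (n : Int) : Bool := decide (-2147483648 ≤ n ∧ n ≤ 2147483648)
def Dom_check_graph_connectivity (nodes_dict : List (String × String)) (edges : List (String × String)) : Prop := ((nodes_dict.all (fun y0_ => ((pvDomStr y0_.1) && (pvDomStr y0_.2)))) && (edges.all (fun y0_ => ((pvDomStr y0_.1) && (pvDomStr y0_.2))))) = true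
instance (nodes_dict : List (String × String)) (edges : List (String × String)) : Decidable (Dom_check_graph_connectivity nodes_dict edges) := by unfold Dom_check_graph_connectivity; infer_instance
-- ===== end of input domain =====

-- B replaces A's adjacency-list + queue BFS by a queue-free label propagation over the raw
-- edge list (repeat full edge passes until a fixpoint); alternative algorithm, shorter code.


-- ===== PORT A =====
-- termination helper (cited by the decreasing_by of both loops): adding a not-yet-contained
-- member of U to the visited set strictly shrinks the list of unvisited U-elements
theorem pv_filter_length_lt {α : Type} (U : List α) (p q : α → Bool)
    (himp : ∀ x, q x = true → p x = true) (u : α) (hu : u ∈ U)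
    (hp : p u = true) (hq : q u = false) :
    (U.filter q).length < (U.filter p).length := by
  induction U with
  | nil => cases hu
  | cons a U ih =>
    rcases List.mem_cons.1 hu with rfl | hu
    · have hle : (U.filter q).length ≤ (U.filter p).length := by
        rw [← List.countP_eq_length_filter, ← List.countP_eq_length_filter]
        exact List.countP_mono_left (fun a _ ha => himp a ha)
      simp only [List.filter_cons, hp, hq, if_true, Bool.false_eq_true, if_false, List.length_cons]
      omega
    · have hlt := ih hu
      cases hqa : q a with
      | true =>
        simp only [List.filter_cons, hqa, himp a hqa, if_true, List.length_cons]
        omega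
      | false =>
        cases hpa : p a with
        | true =>
          simp only [List.filter_cons, hqa, hpa, Bool.false_eq_true, if_false, if_true,
            List.length_cons]
          omega
        | false =>
          simp only [List.filter_cons, hqa, hpa, Bool.false_eq_true, if_false]
          omega

theorem pv_contains_add_mono (s : PySem.Set String) (y x : String)
    (h : PySem.Set.contains s x = true) :
    PySem.Set.contains (PySem.Set.add s y) x = true := by
  exact (PySem.Set.contains_iff _ _).2 ((PySem.Set.mem_add _ _ _).2 (Or.inl ((PySem.Set.contains_iff _ _).1 h)))

-- `graph = defaultdict(set); for source, target in edges: graph[source].add(target); graph[target].add(source)`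
def pvBuildGraph (edges : List (String × String)) : PySem.Dict String (PySem.Set String) :=
  edges.foldl (fun g e =>
    let g1 := g.modify e.1 PySem.Set.empty (fun s => PySem.Set.add s e.2)
    g1.modify e.2 PySem.Set.empty (fun s => PySem.Set.add s e.1)) PySem.Dict.empty

-- every neighbour stored in the adjacency dict is an edge endpoint (cited by port A's proof args)
theorem pvBuildGraph_getD_iff (edges : List (String × String)) (k x : String) :
    x ∈ (pvBuildGraph edges).getD k PySem.Set.empty ↔ ((k, x) ∈ edges ∨ (x, k) ∈ edges) := by
  suffices h : ∀ (es : List (String × String)) (g : PySem.Dict String (PySem.Set String)),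
      x ∈ (es.foldl (fun g e =>
        let g1 := g.modify e.1 PySem.Set.empty (fun s => PySem.Set.add s e.2)
        g1.modify e.2 PySem.Set.empty (fun s => PySem.Set.add s e.1)) g).getD k PySem.Set.empty ↔
      (x ∈ g.getD k PySem.Set.empty ∨ (k, x) ∈ es ∨ (x, k) ∈ es) by
    simpa [pvBuildGraph, PySem.Dict.getD_empty] using h edges PySem.Dict.empty
  intro es
  induction es with
  | nil => intro g; simp
  | cons e es ih =>
    intro g
    obtain ⟨a, b⟩ := e
    rw [List.foldl_cons, ih]
    simp only [PySem.Dict.getD_modify, List.mem_cons, Prod.mk.injEq]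
    by_cases hkb : k = b <;> by_cases hka : k = a <;> (try subst hkb) <;> (try subst hka) <;>
      simp_all <;> tauto

theorem pv_graph_mem_flat (edges : List (String × String)) (k x : String)
    (h : x ∈ (pvBuildGraph edges).getD k PySem.Set.empty) :
    x ∈ edges.flatMap (fun e => [e.1, e.2]) := by
  rcases (pvBuildGraph_getD_iff edges k x).1 h with h1 | h1
  · exact List.mem_flatMap.2 ⟨(k, x), h1, by simp⟩
  · exact List.mem_flatMap.2 ⟨(x, k), h1, by simp⟩

-- the BFS `while queue:` loop of A; U + the two Prop arguments only justify termination
-- (every queue element is an edge endpoint or the start node) and do not affect the value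
def pvBfsLoop (g : PySem.Dict String (PySem.Set String)) (U : List String)
    (hg : ∀ k x, x ∈ g.getD k PySem.Set.empty → x ∈ U)
    (visited : PySem.Set String) (queue : List String)
    (hq : ∀ x ∈ queue, x ∈ U) : PySem.Set String :=
  match queue with
  | [] => visited
  | node :: rest =>
    if hv : PySem.Set.contains visited node then
      pvBfsLoop g U hg visited rest (fun x hx => hq x (List.mem_cons_of_mem _ hx))
    else
      pvBfsLoop g U hg (PySem.Set.add visited node)
        (rest ++ (g.getD node PySem.Set.empty).filter
          (fun y => !(PySem.Set.contains (PySem.Set.add visited node) y)))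
        (fun x hx => by
          rcases List.mem_append.1 hx with h | h
          · exact hq x (List.mem_cons_of_mem _ h)
          · exact hg node x (List.mem_of_mem_filter h))
termination_by ((U.filter (fun u => !(PySem.Set.contains visited u))).length, queue.length)
decreasing_by
· exact Prod.Lex.right _ (Nat.lt_succ_self _)
· apply Prod.Lex.left
  refine pv_filter_length_lt U _ _ ?_ node (hq node List.mem_cons_self) ?_ ?_
  · intro x hx
    simp only [Bool.not_eq_true'] at hx ⊢
    cases hcv : PySem.Set.contains visited x with
    | false => rfl
    | true => rw [pv_contains_add_mono visited node x hcv] at hx; exact hx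
  · simp only [Bool.not_eq_true']
    exact Bool.eq_false_iff.2 hv
  · simp [PySem.Set.mem_add]

-- Python iterates `for neighbor in graph[node]` over a set (hash order); the BFS result is the
-- visited SET, which is order-independent, and only membership in it is consumed below.
def check_graph_connectivity (nodes_dict : List (String × String)) (edges : List (String × String)) : Bool × List String :=
  let d := PySem.Dict.ofList nodes_dict
  match d.keys with
  | [] => (true, [])
  | start :: _ =>
    let visited := pvBfsLoop (pvBuildGraph edges) (start :: edges.flatMap (fun e => [e.1, e.2]))
      (fun k x hx => List.mem_cons_of_mem _ (pv_graph_mem_flat edges k x hx))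
      PySem.Set.empty [start]
      (fun x hx => by simp only [List.mem_singleton] at hx; subst hx; exact List.mem_cons_self)
    -- `nodes_dict[nid]` for nid drawn from nodes_dict's own keys: always present, getD "" is exact
    let unreachable := (d.keys.filter (fun nid => !(PySem.Set.contains visited nid))).map
      (fun nid => d.getD nid "")
    (unreachable.length == 0, unreachable)

-- ===== PORT B =====
-- one `for a, b in edges:` pass of B, threading (reach, changed)
def pvPass (edges : List (String × String)) (st : PySem.Set String × Bool) :
    PySem.Set String × Bool :=
  edges.foldl (fun st e =>
    if PySem.Set.contains st.1 e.1 != PySem.Set.contains st.1 e.2 then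
      (PySem.Set.add (PySem.Set.add st.1 e.1) e.2, true)
    else st) st

-- termination lemmas for pvPropagate (cited in its decreasing_by): a pass only grows reach,
-- and a changing pass adds at least one new edge endpoint
theorem pvPass_subset (edges : List (String × String)) (st : PySem.Set String × Bool)
    (x : String) (hx : x ∈ st.1) : x ∈ (pvPass edges st).1 := by
  induction edges generalizing st with
  | nil => simpa [pvPass] using hx
  | cons e es ih =>
    simp only [pvPass, List.foldl_cons] at ih ⊢
    by_cases hflip : (PySem.Set.contains st.1 e.1 != PySem.Set.contains st.1 e.2) = true
    · rw [if_pos hflip]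
      exact ih _ ((PySem.Set.mem_add _ _ _).2 (Or.inl ((PySem.Set.mem_add _ _ _).2 (Or.inl hx))))
    · rw [if_neg hflip]
      exact ih _ hx

theorem pvPass_changed (edges : List (String × String)) (r : PySem.Set String)
    (h : (pvPass edges (r, false)).2 = true) :
    ∃ u, u ∈ edges.flatMap (fun e => [e.1, e.2]) ∧ u ∉ r ∧ u ∈ (pvPass edges (r, false)).1 := by
  induction edges generalizing r with
  | nil => simp [pvPass] at h
  | cons e es ih =>
    simp only [pvPass, List.foldl_cons] at h ⊢
    by_cases hflip : (PySem.Set.contains r e.1 != PySem.Set.contains r e.2) = true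
    · rw [if_pos hflip] at h ⊢
      cases hc1 : PySem.Set.contains r e.1 with
      | false =>
        refine ⟨e.1, List.mem_flatMap.2 ⟨e, List.mem_cons_self, by simp⟩, ?_, ?_⟩
        · intro hm
          have hc := (PySem.Set.contains_iff r e.1).2 hm
          rw [hc1] at hc
          exact absurd hc (by decide)
        · exact pvPass_subset es _ e.1
            ((PySem.Set.mem_add _ _ _).2 (Or.inl ((PySem.Set.mem_add _ _ _).2 (Or.inr rfl))))
      | true =>
        have hc2 : PySem.Set.contains r e.2 = false := by
          cases hc2 : PySem.Set.contains r e.2 with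
          | false => rfl
          | true => rw [hc1, hc2] at hflip; simp at hflip
        refine ⟨e.2, List.mem_flatMap.2 ⟨e, List.mem_cons_self, by simp⟩, ?_, ?_⟩
        · intro hm
          have hc := (PySem.Set.contains_iff r e.2).2 hm
          rw [hc2] at hc
          exact absurd hc (by decide)
        · exact pvPass_subset es _ e.2 ((PySem.Set.mem_add _ _ _).2 (Or.inr rfl))
    · rw [if_neg hflip] at h ⊢
      obtain ⟨u, hu, hur, hupass⟩ := ih r h
      refine ⟨u, ?_, hur, ?_⟩
      · simp only [List.flatMap_cons, List.mem_append]
        exact Or.inr (by simpa [pvPass] using hu)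
      · simpa [pvPass] using hupass

-- B's `while changed:` loop
def pvPropagate (edges : List (String × String)) (reach : PySem.Set String) : PySem.Set String :=
  let st := pvPass edges (reach, false)
  if h : st.2 then pvPropagate edges st.1 else st.1
termination_by ((edges.flatMap (fun e => [e.1, e.2])).filter
  (fun u => !(PySem.Set.contains reach u))).length
decreasing_by
  obtain ⟨u, hu, hur, hur'⟩ := pvPass_changed edges reach h
  refine pv_filter_length_lt _ _ _ ?_ u hu ?_ ?_
  · intro x hx
    simp only [Bool.not_eq_true'] at hx ⊢
    cases hcv : PySem.Set.contains reach x with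
    | false => rfl
    | true =>
      rw [(PySem.Set.contains_iff _ _).2
        (pvPass_subset edges (reach, false) x ((PySem.Set.contains_iff _ _).1 hcv))] at hx
      exact hx
  · simp only [Bool.not_eq_true']
    exact Bool.eq_false_iff.2 (fun hc => hur ((PySem.Set.contains_iff _ _).1 hc))
  · simp [hur']

def check_graph_connectivity_alt (nodes_dict : List (String × String)) (edges : List (String × String)) : Bool × List String :=
  let d := PySem.Dict.ofList nodes_dict
  match d.keys with
  | [] => (true, [])
  | start :: _ =>
    let reach := pvPropagate edges (PySem.Set.add PySem.Set.empty start)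
    let unreachable := (d.items.filter (fun kv => !(PySem.Set.contains reach kv.1))).map
      (fun kv => kv.2)
    (unreachable.isEmpty, unreachable)

-- ===== PRECONDITION & SPEC =====
def Spec_check_graph_connectivity (nodes_dict : List (String × String)) (edges : List (String × String)) (out : Bool × List String) : Prop := out = check_graph_connectivity_alt nodes_dict edges
instance (nodes_dict : List (String × String)) (edges : List (String × String)) (out : Bool × List String) : Decidable (Spec_check_graph_connectivity nodes_dict edges out) := by unfold Spec_check_graph_connectivity; infer_instance

-- ===== CLAIM (what is proved, stated in full; the proofs are below) =====
def Claim_equal_check_graph_connectivity : Prop := ∀ (nodes_dict : List (String × String)) (edges : List (String × String)), Dom_check_graph_connectivity nodes_dict edges → Spec_check_graph_connectivity nodes_dict edges (check_graph_connectivity nodes_dict edges)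

-- ===== LEMMAS AND PROOFS =====
-- undirected adjacency and reachability along `edges`
def pvAdj (edges : List (String × String)) (a b : String) : Prop :=
  (a, b) ∈ edges ∨ (b, a) ∈ edges

def pvReach (edges : List (String × String)) (s x : String) : Prop :=
  Relation.ReflTransGen (pvAdj edges) s x

theorem pvBfsLoop_mem_init (g : PySem.Dict String (PySem.Set String)) (U : List String)
    (hg : ∀ k x, x ∈ g.getD k PySem.Set.empty → x ∈ U)
    (visited : PySem.Set String) (queue : List String) (hq : ∀ x ∈ queue, x ∈ U) :
    ∀ x, (x ∈ visited ∨ x ∈ queue) → x ∈ pvBfsLoop g U hg visited queue hq := by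
  fun_induction pvBfsLoop g U hg visited queue hq
  case case1 =>
    intro x hx
    rcases hx with hx | hx
    · exact hx
    · cases hx
  case case2 =>
    rename_i visited node rest hq1 hv hq2 ih
    intro x hx
    rcases hx with hx | hx
    · exact ih x (Or.inl hx)
    · rcases List.mem_cons.1 hx with rfl | hx
      · exact ih x (Or.inl ((PySem.Set.contains_iff _ _).1 hv))
      · exact ih x (Or.inr hx)
  case case3 =>
    rename_i visited node rest hq1 hv hq2 ih
    intro x hx
    rcases hx with hx | hx
    · exact ih x (Or.inl ((PySem.Set.mem_add _ _ _).2 (Or.inl hx)))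
    · rcases List.mem_cons.1 hx with rfl | hx
      · exact ih x (Or.inl ((PySem.Set.mem_add _ _ _).2 (Or.inr rfl)))
      · exact ih x (Or.inr (List.mem_append.2 (Or.inl hx)))

theorem pvBfsLoop_sound (edges : List (String × String)) (s : String)
    (g : PySem.Dict String (PySem.Set String)) (U : List String)
    (hg : ∀ k x, x ∈ g.getD k PySem.Set.empty → x ∈ U)
    (hadj : ∀ k x, x ∈ g.getD k PySem.Set.empty → pvAdj edges k x)
    (visited : PySem.Set String) (queue : List String) (hq : ∀ x ∈ queue, x ∈ U) :
    (∀ x ∈ visited, pvReach edges s x) → (∀ x ∈ queue, pvReach edges s x) →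
    ∀ x ∈ pvBfsLoop g U hg visited queue hq, pvReach edges s x := by
  fun_induction pvBfsLoop g U hg visited queue hq
  case case1 =>
    intro h1 _ x hx
    exact h1 x hx
  case case2 =>
    rename_i visited node rest hq1 hv hq2 ih
    intro h1 h2
    exact ih h1 (fun x hx => h2 x (List.mem_cons_of_mem _ hx))
  case case3 =>
    rename_i visited node rest hq1 hv hq2 ih
    intro h1 h2
    apply ih
    · intro x hx
      rcases (PySem.Set.mem_add _ _ _).1 hx with hx | rfl
      · exact h1 x hx
      · exact h2 x List.mem_cons_self
    · intro x hx
      rcases List.mem_append.1 hx with hx | hx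
      · exact h2 x (List.mem_cons_of_mem _ hx)
      · exact Relation.ReflTransGen.tail (h2 node List.mem_cons_self)
          (hadj node x (List.mem_of_mem_filter hx))

theorem pvBfsLoop_closed (edges : List (String × String))
    (g : PySem.Dict String (PySem.Set String)) (U : List String)
    (hg : ∀ k x, x ∈ g.getD k PySem.Set.empty → x ∈ U)
    (hadj : ∀ k x, pvAdj edges k x → x ∈ g.getD k PySem.Set.empty)
    (visited : PySem.Set String) (queue : List String) (hq : ∀ x ∈ queue, x ∈ U) :
    (∀ v ∈ visited, ∀ y, pvAdj edges v y → y ∈ visited ∨ y ∈ queue) →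
    ∀ v ∈ pvBfsLoop g U hg visited queue hq, ∀ y, pvAdj edges v y →
      y ∈ pvBfsLoop g U hg visited queue hq := by
  fun_induction pvBfsLoop g U hg visited queue hq
  case case1 =>
    intro hinv v hv y hy
    rcases hinv v hv y hy with h | h
    · exact h
    · cases h
  case case2 =>
    rename_i visited node rest hq1 hv hq2 ih
    intro hinv
    apply ih
    intro v hvv y hy
    rcases hinv v hvv y hy with h | h
    · exact Or.inl h
    · rcases List.mem_cons.1 h with rfl | h
      · exact Or.inl ((PySem.Set.contains_iff _ _).1 hv)
      · exact Or.inr h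
  case case3 =>
    rename_i visited node rest hq1 hv hq2 ih
    intro hinv
    apply ih
    intro v hvv y hy
    rcases (PySem.Set.mem_add _ _ _).1 hvv with hv' | rfl
    · rcases hinv v hv' y hy with h | h
      · exact Or.inl ((PySem.Set.mem_add _ _ _).2 (Or.inl h))
      · rcases List.mem_cons.1 h with rfl | h
        · exact Or.inl ((PySem.Set.mem_add _ _ _).2 (Or.inr rfl))
        · exact Or.inr (List.mem_append.2 (Or.inl h))
    · have hy' : y ∈ g.getD v PySem.Set.empty := hadj v y hy
      by_cases hyv : y ∈ PySem.Set.add visited v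
      · exact Or.inl hyv
      · refine Or.inr (List.mem_append.2 (Or.inr (List.mem_filter.2 ⟨hy', ?_⟩)))
        simp
        exact ⟨fun h => hyv ((PySem.Set.mem_add _ _ _).2 (Or.inl h)),
          fun h => hyv ((PySem.Set.mem_add _ _ _).2 (Or.inr h))⟩

theorem pvBfs_char (edges : List (String × String)) (start : String) (U : List String)
    (hg : ∀ k x, x ∈ (pvBuildGraph edges).getD k PySem.Set.empty → x ∈ U)
    (hq : ∀ x ∈ [start], x ∈ U) (x : String) :
    x ∈ pvBfsLoop (pvBuildGraph edges) U hg PySem.Set.empty [start] hq ↔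
      pvReach edges start x := by
  constructor
  · intro hx
    refine pvBfsLoop_sound edges start (pvBuildGraph edges) U hg ?_ PySem.Set.empty [start] hq
      ?_ ?_ x hx
    · intro k y hy
      exact (pvBuildGraph_getD_iff edges k y).1 hy
    · intro y hy
      simp [PySem.Set.empty] at hy
    · intro y hy
      rcases List.mem_singleton.1 hy with rfl
      exact Relation.ReflTransGen.refl
  · intro hx
    unfold pvReach at hx
    induction hx with
    | refl =>
      exact pvBfsLoop_mem_init _ _ _ _ _ _ start (Or.inr (List.mem_singleton.2 rfl))
    | tail hab hbc ih =>
      exact pvBfsLoop_closed edges _ U hg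
        (fun k y hy => (pvBuildGraph_getD_iff edges k y).2 (by simpa [pvAdj] using hy)) _ _ hq
        (fun v hv => by simp [PySem.Set.empty] at hv) _ ih _ hbc

theorem pvPass_sound (edges edges' : List (String × String)) (s : String)
    (hsub : ∀ e ∈ edges', e ∈ edges) (st : PySem.Set String × Bool)
    (hst : ∀ x ∈ st.1, pvReach edges s x) :
    ∀ x ∈ (pvPass edges' st).1, pvReach edges s x := by
  induction edges' generalizing st with
  | nil => simpa [pvPass] using hst
  | cons e es ih =>
    simp only [pvPass, List.foldl_cons]
    have he : (e.1, e.2) ∈ edges := by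
      have h := hsub e List.mem_cons_self
      simpa using h
    by_cases hflip : (PySem.Set.contains st.1 e.1 != PySem.Set.contains st.1 e.2) = true
    · rw [if_pos hflip]
      have hstep : ∀ x ∈ (PySem.Set.add (PySem.Set.add st.1 e.1) e.2), pvReach edges s x := by
        intro x hx
        rcases (PySem.Set.mem_add _ _ _).1 hx with hx1 | rfl
        · rcases (PySem.Set.mem_add _ _ _).1 hx1 with hx2 | rfl
          · exact hst x hx2
          · cases hc1 : PySem.Set.contains st.1 e.1 with
            | true => exact hst e.1 ((PySem.Set.contains_iff _ _).1 hc1)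
            | false =>
              have hc2 : PySem.Set.contains st.1 e.2 = true := by
                cases hc2 : PySem.Set.contains st.1 e.2 with
                | true => rfl
                | false => rw [hc1, hc2] at hflip; simp at hflip
              exact Relation.ReflTransGen.tail (hst e.2 ((PySem.Set.contains_iff _ _).1 hc2))
                (Or.inr he)
        · cases hc2 : PySem.Set.contains st.1 e.2 with
          | true => exact hst e.2 ((PySem.Set.contains_iff _ _).1 hc2)
          | false =>
            have hc1 : PySem.Set.contains st.1 e.1 = true := by
              cases hc1 : PySem.Set.contains st.1 e.1 with
              | true => rfl
              | false => rw [hc1, hc2] at hflip; simp at hflip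
            exact Relation.ReflTransGen.tail (hst e.1 ((PySem.Set.contains_iff _ _).1 hc1))
              (Or.inl he)
      exact ih (fun e' he' => hsub e' (List.mem_cons_of_mem _ he')) _ hstep
    · rw [if_neg hflip]
      exact ih (fun e' he' => hsub e' (List.mem_cons_of_mem _ he')) st hst

theorem pvPass_true (edges : List (String × String)) (st : PySem.Set String × Bool)
    (h : st.2 = true) : (pvPass edges st).2 = true := by
  induction edges generalizing st with
  | nil => simpa [pvPass] using h
  | cons e es ih =>
    simp only [pvPass, List.foldl_cons]
    by_cases hflip : (PySem.Set.contains st.1 e.1 != PySem.Set.contains st.1 e.2) = true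
    · rw [if_pos hflip]
      exact ih _ rfl
    · rw [if_neg hflip]
      exact ih _ h

theorem pvPass_cons (e : String × String) (es : List (String × String))
    (st : PySem.Set String × Bool) :
    pvPass (e :: es) st = pvPass es
      (if (PySem.Set.contains st.1 e.1 != PySem.Set.contains st.1 e.2) = true then
        (PySem.Set.add (PySem.Set.add st.1 e.1) e.2, true) else st) := rfl

theorem pvPass_unchanged (edges : List (String × String)) (r : PySem.Set String)
    (h : (pvPass edges (r, false)).2 = false) :
    (pvPass edges (r, false)).1 = r ∧
      ∀ e ∈ edges, PySem.Set.contains r e.1 = PySem.Set.contains r e.2 := by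
  induction edges generalizing r with
  | nil => exact ⟨rfl, by simp⟩
  | cons e es ih =>
    rw [pvPass_cons] at h ⊢
    by_cases hflip : (PySem.Set.contains r e.1 != PySem.Set.contains r e.2) = true
    · rw [if_pos hflip] at h
      have htrue := pvPass_true es (PySem.Set.add (PySem.Set.add r e.1) e.2, true) rfl
      rw [htrue] at h
      exact absurd h (by decide)
    · rw [if_neg hflip] at h ⊢
      obtain ⟨h1, h2⟩ := ih r h
      refine ⟨h1, ?_⟩
      intro e' he'
      rcases List.mem_cons.1 he' with rfl | he'
      · have hiff : e'.1 ∈ r ↔ e'.2 ∈ r := by simpa using hflip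
        cases hc : PySem.Set.contains r e'.1 with
        | true =>
          exact ((PySem.Set.contains_iff _ _).2 (hiff.1 ((PySem.Set.contains_iff _ _).1 hc))).symm
        | false =>
          have hc2 : PySem.Set.contains r e'.2 = false :=
            Bool.eq_false_iff.2 (fun ht => (Bool.eq_false_iff.1 hc)
              ((PySem.Set.contains_iff _ _).2 (hiff.2 ((PySem.Set.contains_iff _ _).1 ht))))
          rw [hc2]
      · exact h2 e' he' 

theorem pvPropagate_subset (edges : List (String × String)) (reach : PySem.Set String) :
    ∀ x ∈ reach, x ∈ pvPropagate edges reach := by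
  fun_induction pvPropagate edges reach
  case case1 =>
    rename_i reach st h ih
    intro x hx
    exact ih x (pvPass_subset edges (reach, false) x hx)
  case case2 =>
    rename_i reach st h
    intro x hx
    exact pvPass_subset edges (reach, false) x hx

theorem pvPropagate_sound (edges : List (String × String)) (s : String)
    (reach : PySem.Set String) :
    (∀ x ∈ reach, pvReach edges s x) → ∀ x ∈ pvPropagate edges reach, pvReach edges s x := by
  fun_induction pvPropagate edges reach
  case case1 =>
    rename_i reach st h ih
    intro hr
    exact ih (pvPass_sound edges edges s (fun e he => he) (reach, false) hr)
  case case2 =>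
    rename_i reach st h
    intro hr
    exact pvPass_sound edges edges s (fun e he => he) (reach, false) hr

theorem pvPropagate_closed (edges : List (String × String)) (reach : PySem.Set String) :
    ∀ e ∈ edges, PySem.Set.contains (pvPropagate edges reach) e.1 =
      PySem.Set.contains (pvPropagate edges reach) e.2 := by
  fun_induction pvPropagate edges reach
  case case1 =>
    rename_i reach st h ih
    exact ih
  case case2 =>
    rename_i reach st h
    have hfalse : (pvPass edges (reach, false)).2 = false := by
      cases hc : (pvPass edges (reach, false)).2 with
      | false => rfl
      | true => exact absurd hc h
    obtain ⟨h1, h2⟩ := pvPass_unchanged edges reach hfalse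
    intro e he
    have h1' : (pvPass edges (reach, false)).1 = reach := h1
    rw [show ((pvPass edges (reach, false)).1 : PySem.Set String) = reach from h1']
    exact h2 e he

theorem pvPropagate_char (edges : List (String × String)) (start x : String) :
    x ∈ pvPropagate edges (PySem.Set.add PySem.Set.empty start) ↔ pvReach edges start x := by
  constructor
  · intro hx
    refine pvPropagate_sound edges start _ ?_ x hx
    intro y hy
    rcases (PySem.Set.mem_add _ _ _).1 hy with hy | rfl
    · simp [PySem.Set.empty] at hy
    · exact Relation.ReflTransGen.refl
  · intro hx
    unfold pvReach at hx
    induction hx with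
    | refl =>
      exact pvPropagate_subset edges _ start ((PySem.Set.mem_add _ _ _).2 (Or.inr rfl))
    | tail hab hbc ih =>
      rename_i b c
      rcases hbc with hbc | hbc
      · have := pvPropagate_closed edges (PySem.Set.add PySem.Set.empty start) (b, c) hbc
        exact (PySem.Set.contains_iff _ _).1
          (this ▸ (PySem.Set.contains_iff _ _).2 ih)
      · have := pvPropagate_closed edges (PySem.Set.add PySem.Set.empty start) (c, b) hbc
        exact (PySem.Set.contains_iff _ _).1
          (this ▸ (PySem.Set.contains_iff _ _).2 ih)

theorem pv_contains_eq {s t : PySem.Set String} (h : ∀ y, y ∈ s ↔ y ∈ t) (y : String) :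
    PySem.Set.contains s y = PySem.Set.contains t y := by
  cases hcs : PySem.Set.contains s y with
  | true =>
    exact ((PySem.Set.contains_iff _ _).2 ((h y).1 ((PySem.Set.contains_iff _ _).1 hcs))).symm
  | false =>
    cases hct : PySem.Set.contains t y with
    | false => rfl
    | true =>
      exact absurd ((PySem.Set.contains_iff _ _).2 ((h y).2 ((PySem.Set.contains_iff _ _).1 hct)))
        (Bool.eq_false_iff.1 hcs)

theorem pv_len_beq_isEmpty {α : Type} (l : List α) : (l.length == 0) = l.isEmpty := by
  cases l <;> rfl

theorem pv_unreach_eq (d : PySem.Dict String String) (hnd : d.keys.Nodup) (c : String → Bool) :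
    (d.items.filter (fun kv => c kv.1)).map (fun kv => kv.2) =
      (d.keys.filter c).map (fun k => d.getD k "") := by
  rw [PySem.Dict.items_eq_map_keys d hnd ""]
  simp [List.filter_map, List.map_map, Function.comp_def]

-- ===== VERDICT (by name: the statement is the Claim_ definition above) =====
theorem check_graph_connectivity_spec : Claim_equal_check_graph_connectivity := by
  intro nodes_dict edges _
  unfold Spec_check_graph_connectivity
  simp only [check_graph_connectivity, check_graph_connectivity_alt]
  cases hk : (PySem.Dict.ofList nodes_dict).keys with
  | nil => rfl
  | cons start tl =>
    dsimp only
    have hnd : (PySem.Dict.ofList nodes_dict).keys.Nodup := PySem.Dict.nodup_keys_ofList nodes_dict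
    have hlist : ∀ (V R : PySem.Set String), (∀ y, y ∈ V ↔ y ∈ R) →
        ((start :: tl).filter (fun nid => !(PySem.Set.contains V nid))).map
            (fun nid => (PySem.Dict.ofList nodes_dict).getD nid "") =
          ((PySem.Dict.ofList nodes_dict).items.filter
            (fun kv => !(PySem.Set.contains R kv.1))).map (fun kv => kv.2) := by
      intro V R hVR
      rw [← hk, pv_unreach_eq _ hnd (fun k => !(PySem.Set.contains R k))]
      congr 1
      apply List.filter_congr
      intro k _
      rw [pv_contains_eq hVR k]
    have hVR := fun y => (pvBfs_char edges start (start :: edges.flatMap (fun e => [e.1, e.2]))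
        (fun k x hx => List.mem_cons_of_mem _ (pv_graph_mem_flat edges k x hx))
        (fun x hx => by simp only [List.mem_singleton] at hx; subst hx; exact List.mem_cons_self)
        y).trans (pvPropagate_char edges start y).symm
    have hl := hlist _ _ hVR
    rw [hl, pv_len_beq_isEmpty]
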